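-- pv_equiv track=rewrite | github.com/woodyk/symbiote | symbiote/sym_identify.py | validate_routing_number
-- ===== SOURCE A (Python) =====
-- def validate_routing_number(routing_number: str) -> bool:
--     """
--     Validate a routing number using the checksum algorithm.
--
--     Args:
--         routing_number (str): 9-digit routing number.
--
--     Returns:
--         bool: True if valid, False otherwise.
--     """
--     if len(routing_number) != 9 or not routing_number.isdigit():
--         return False
--
--     digits = [int(d) for d in routing_number]
--     checksum = (
--         3 * (digits[0] + digits[3] + digits[6])
--         + 7 * (digits[1] + digits[4] + digits[7])
--         + (digits[2] + digits[5] + digits[8])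
--     )
--     return checksum % 10 == 0
-- ===== SOURCE B (Python) =====
-- def validate_routing_number(routing_number: str) -> bool:
--     if len(routing_number) != 9 or not routing_number.isdigit():
--         return False
--     # Compute the expected ABA check digit from the first eight digits with a
--     # running mod-10 accumulator, then compare it with the ninth digit.
--     acc = 0
--     for i in range(8):
--         acc = (acc + (3, 7, 1)[i % 3] * int(routing_number[i])) % 10
--     return int(routing_number[8]) == (10 - acc) % 10
-- ===== Notes on version B (the rewrite author's own statement) =====
-- stated objective: alternative
-- what changed: Instead of summing all nine digits in three index groups and testing divisibility of the total by 10, B runs a mod-10 accumulator over the first eight digits to compute the expected ABA check digit and compares it with the ninth digit.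
import Mathlib
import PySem

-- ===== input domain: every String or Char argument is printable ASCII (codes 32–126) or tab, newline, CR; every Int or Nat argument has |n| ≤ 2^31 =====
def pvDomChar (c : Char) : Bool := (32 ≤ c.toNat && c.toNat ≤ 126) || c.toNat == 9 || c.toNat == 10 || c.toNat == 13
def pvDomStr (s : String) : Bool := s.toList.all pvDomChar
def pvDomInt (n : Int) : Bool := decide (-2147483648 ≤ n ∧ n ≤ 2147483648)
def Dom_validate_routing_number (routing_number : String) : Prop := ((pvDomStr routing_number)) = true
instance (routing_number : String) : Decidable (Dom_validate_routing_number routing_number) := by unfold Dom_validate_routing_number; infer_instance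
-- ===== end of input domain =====

-- B replaces A's three-group full-checksum-divisibility test by the classic ABA
-- check-digit computation: a running mod-10 accumulator over the first eight digits
-- yields the expected ninth digit, which is compared with the actual one (objective: alternative).

-- ===== PORT A =====
-- int(d) for a single digit character d; exact where isdigit d holds (the only place either port reaches it)
def pyDigitInt (c : Char) : Int := (PySem.Int.ofChars? [c]).getD 0

def validate_routing_number (routing_number : String) : Bool :=
  if PySem.Str.len routing_number ≠ 9 || !(PySem.Str.strIsdigit routing_number) then false
  else
    let digits := routing_number.toList.map pyDigitInt
    let checksum : Int :=
      3 * (digits.getD 0 0 + digits.getD 3 0 + digits.getD 6 0)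
      + 7 * (digits.getD 1 0 + digits.getD 4 0 + digits.getD 7 0)
      + (digits.getD 2 0 + digits.getD 5 0 + digits.getD 8 0)
    PySem.Int.mod checksum 10 == 0

-- ===== PORT B =====
-- routing_number[i] for i in range(8) and routing_number[8] are always in range
-- after the length-9 guard, so the .getD ' ' default is never used.
def validate_routing_number_alt (routing_number : String) : Bool :=
  if PySem.Str.len routing_number ≠ 9 || !(PySem.Str.strIsdigit routing_number) then false
  else
    let acc : Int := (PySem.List.pyRange 0 8 1).foldl
      (fun acc i =>
        PySem.Int.mod
          (acc + (PySem.List.pyGet? ([3, 7, 1] : List Int) (PySem.Int.mod i 3)).getD 0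
               * pyDigitInt ((PySem.Str.pyGet? routing_number i).getD ' ')) 10) 0
    pyDigitInt ((PySem.Str.pyGet? routing_number 8).getD ' ') == PySem.Int.mod (10 - acc) 10

-- ===== PRECONDITION & SPEC =====
def Spec_validate_routing_number (routing_number : String) (out : Bool) : Prop := out = validate_routing_number_alt routing_number
instance (routing_number : String) (out : Bool) : Decidable (Spec_validate_routing_number routing_number out) := by unfold Spec_validate_routing_number; infer_instance

-- ===== CLAIM =====
def Claim_equal_validate_routing_number : Prop := ∀ (routing_number : String), Dom_validate_routing_number routing_number → Spec_validate_routing_number routing_number (validate_routing_number routing_number)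

-- ===== LEMMAS AND PROOFS =====
theorem len9_toList (s : String) (h : PySem.Str.len s = 9) :
    ∃ a b c d e f g i j : Char, s.toList = [a, b, c, d, e, f, g, i, j] := by
  have hl : s.toList.length = 9 := by
    have := PySem.Str.len_eq (s := s); omega
  match hx : s.toList, hl with
  | [a, b, c, d, e, f, g, i, j], _ => exact ⟨a, b, c, d, e, f, g, i, j, rfl⟩

theorem digitBounds (c : Char) (h : PySem.Chars.isdigit c = true) :
    48 ≤ (c.toNat : Int) ∧ (c.toNat : Int) ≤ 57 := by
  simp [PySem.Chars.isdigit] at h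
  obtain ⟨h1, h2⟩ := h
  have h1' : 48 ≤ c.toNat := h1
  have h2' : c.toNat ≤ 57 := h2
  omega

theorem digitVal (c : Char) (h : PySem.Chars.isdigit c = true) :
    pyDigitInt c = (c.toNat : Int) - 48 := by
  unfold pyDigitInt
  simp [PySem.Chars.isdigit] at h
  obtain ⟨h1, h2⟩ := h
  have h1' : 48 ≤ c.toNat := h1
  have h2' : c.toNat ≤ 57 := h2
  have hc := Char.ofNat_toNat c
  interval_cases hn : c.toNat <;> (subst hc; decide)

-- ===== VERDICT =====
theorem validate_routing_number_spec : Claim_equal_validate_routing_number := by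
  intro s _
  unfold Spec_validate_routing_number validate_routing_number validate_routing_number_alt
  by_cases h : PySem.Str.len s = 9
  · obtain ⟨a, b, c, d, e, f, g, i, j, hx⟩ := len9_toList s h
    by_cases hd : PySem.Str.strIsdigit s = true
    · have hds : PySem.Chars.strIsdigit [a, b, c, d, e, f, g, i, j] = true := by
        rw [← hx, ← PySem.Str.strIsdigit_eq]; exact hd
      simp [PySem.Chars.strIsdigit, List.all] at hds
      obtain ⟨d0, d1, d2, d3, d4, d5, d6, d7, d8⟩ := hds
      have hlt : s.toList.length = 9 := by rw [hx]; rfl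
      have hlen : ((s.length : Int)) = 9 := by exact_mod_cast hlt
      have hd' : PySem.Chars.strIsdigit s.toList = true := by
        rw [← PySem.Str.strIsdigit_eq]; exact hd
      simp only [hx] at hd' ⊢
      norm_num [hlen, hd', hx, PySem.List.pyRange,
        PySem.List.pyGet?, PySem.List.pyIdx?, List.foldl, List.getD]
      have hrange : List.map (fun k : Nat => (k : Int)) (List.range (Int.toNat 8)) = [0, 1, 2, 3, 4, 5, 6, 7] := by decide
      rw [hrange]
      norm_num [List.foldl, show Int.toNat 0 = 0 from rfl, show Int.toNat 1 = 1 from rfl, show Int.toNat 2 = 2 from rfl, show Int.toNat 3 = 3 from rfl, show Int.toNat 4 = 4 from rfl, show Int.toNat 5 = 5 from rfl, show Int.toNat 6 = 6 from rfl, show Int.toNat 7 = 7 from rfl, show Int.toNat 8 = 8 from rfl]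
      rw [digitVal a d0, digitVal b d1, digitVal c d2, digitVal d d3, digitVal e d4,
        digitVal f d5, digitVal g d6, digitVal i d7, digitVal j d8]
      obtain ⟨a1, a2⟩ := digitBounds a d0
      obtain ⟨b1, b2⟩ := digitBounds b d1
      obtain ⟨c1, c2⟩ := digitBounds c d2
      obtain ⟨e1, e2⟩ := digitBounds e d4
      obtain ⟨f1, f2⟩ := digitBounds f d5
      obtain ⟨g1, g2⟩ := digitBounds g d6
      obtain ⟨i1, i2⟩ := digitBounds i d7
      obtain ⟨j1, j2⟩ := digitBounds j d8
      obtain ⟨dd1, dd2⟩ := digitBounds d d3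
      omega
    · have hd' : PySem.Chars.strIsdigit s.toList = false := by
        rw [← PySem.Str.strIsdigit_eq]; simpa using hd
      simp [hd']
  · have h' : ((s.length : Int)) ≠ 9 := by
      have h2 := PySem.Str.len_eq (s := s)
      intro hh
      apply h
      rw [h2]
      exact_mod_cast hh
    simp [h']
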